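-- pv_equiv track=rewrite | github.com/be-y-a/smth | OZON/DISCRETE_MODELS/.ipynb_checkpoints/WEEK1_injective_surjective_partialOrder_equivalence-checkpoint.py | is_injective
-- ===== SOURCE A (Python) =====
-- def is_injective(R, A, B):
--     left = set()
--     right = set()
--     for x in R:
--         if x[1] in right or x[0] not in A or x[1] not in B:
--             return False
--         right.add(x[1])
--     return True
-- ===== SOURCE B (Python) =====
-- def is_injective(R, A, B):
--     Aset, Bset = set(A), set(B)
--     if any(x[0] not in Aset or x[1] not in Bset for x in R):
--         return False
--     rights = sorted(x[1] for x in R)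
--     return all(a != b for a, b in zip(rights, rights[1:]))
-- ===== Notes on version B (the rewrite author's own statement) =====
-- stated objective: alternative
-- what changed: Duplicate detection among second coordinates is done by sorting them and scanning adjacent pairs (sort-then-scan), instead of A's incremental running-set with early return; membership is checked first against prebuilt sets.
import Mathlib
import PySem

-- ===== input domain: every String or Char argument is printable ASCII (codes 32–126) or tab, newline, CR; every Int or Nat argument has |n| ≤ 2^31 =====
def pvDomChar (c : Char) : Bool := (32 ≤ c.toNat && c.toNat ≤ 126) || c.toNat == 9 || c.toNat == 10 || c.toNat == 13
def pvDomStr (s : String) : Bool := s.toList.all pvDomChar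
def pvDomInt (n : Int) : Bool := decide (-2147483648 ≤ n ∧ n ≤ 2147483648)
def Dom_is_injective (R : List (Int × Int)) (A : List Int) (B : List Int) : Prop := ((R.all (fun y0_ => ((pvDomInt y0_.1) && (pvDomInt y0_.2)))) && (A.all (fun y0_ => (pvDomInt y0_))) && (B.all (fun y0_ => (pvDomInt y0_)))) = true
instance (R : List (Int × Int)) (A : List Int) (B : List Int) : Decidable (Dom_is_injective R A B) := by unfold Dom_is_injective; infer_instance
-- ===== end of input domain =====

-- B detects duplicate second coordinates by sorting them and scanning adjacent pairs
-- (sort-then-scan), instead of A's running-set loop with early return; same results, different algorithm.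

-- ===== PORT A =====
-- A's loop: walk R keeping the set of second coordinates seen so far; return False at the
-- first duplicate second coordinate or membership failure.  (A's 'left' set is created and
-- never used; it is omitted.)
def isInjLoop (right : PySem.Set Int) (R : List (Int × Int)) (A B : List Int) : Bool :=
  match R with
  | [] => true
  | x :: xs =>
    if right.contains x.2 || !(A.contains x.1) || !(B.contains x.2) then false
    else isInjLoop (right.add x.2) xs A B

def is_injective (R : List (Int × Int)) (A : List Int) (B : List Int) : Bool :=
  isInjLoop PySem.Set.empty R A B

-- ===== PORT B =====
def is_injective_alt (R : List (Int × Int)) (A : List Int) (B : List Int) : Bool :=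
  let Aset := PySem.Set.ofList A
  let Bset := PySem.Set.ofList B
  if R.any (fun x => !(Aset.contains x.1) || !(Bset.contains x.2)) then false
  else
    let rights := PySem.List.sorted (R.map (fun x => x.2)) (fun v => v) false
    (rights.zip (rights.drop 1)).all (fun p => p.1 != p.2)

-- ===== PRECONDITION & SPEC =====
def Spec_is_injective (R : List (Int × Int)) (A : List Int) (B : List Int) (out : Bool) : Prop := out = is_injective_alt R A B
instance (R : List (Int × Int)) (A : List Int) (B : List Int) (out : Bool) : Decidable (Spec_is_injective R A B out) := by unfold Spec_is_injective; infer_instance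

-- ===== CLAIM (what is proved, stated in full; the proofs are below) =====
def Claim_equal_is_injective : Prop := ∀ (R : List (Int × Int)) (A : List Int) (B : List Int), Dom_is_injective R A B → Spec_is_injective R A B (is_injective R A B)

-- ===== LEMMAS AND PROOFS =====

lemma isInjLoop_iff (A B : List Int) :
    ∀ (R : List (Int × Int)) (s : PySem.Set Int),
      isInjLoop s R A B = true ↔
        (R.map Prod.snd).Nodup ∧ (∀ x ∈ R, x.2 ∉ s) ∧ (∀ x ∈ R, x.1 ∈ A ∧ x.2 ∈ B) := by
  intro R
  induction R with
  | nil => intro s; simp [isInjLoop]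
  | cons x xs ih =>
    intro s
    simp only [isInjLoop]
    by_cases h : (s.contains x.2 || !(A.contains x.1) || !(B.contains x.2)) = true
    · simp only [h, if_true]
      constructor
      · intro hf; exact absurd hf (by simp)
      · rintro ⟨hnd, hns, hmem⟩
        exfalso
        have hx2s : x.2 ∉ s := hns x (by simp)
        have hxa : x.1 ∈ A ∧ x.2 ∈ B := hmem x (by simp)
        simp only [Bool.or_eq_true, Bool.not_eq_true'] at h
        rcases h with (h | h) | h
        · exact hx2s (by simpa [PySem.Set.contains_iff] using h)
        · exact absurd hxa.1 (by simpa [List.contains_iff_mem] using h)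
        · exact absurd hxa.2 (by simpa [List.contains_iff_mem] using h)
    · have h' : (s.contains x.2 || !(A.contains x.1) || !(B.contains x.2)) = false :=
        Bool.not_eq_true _ ▸ Bool.eq_false_iff.mpr h
      simp only [h', Bool.false_eq_true, if_false]
      simp only [Bool.or_eq_false_iff, Bool.not_eq_false'] at h'
      obtain ⟨⟨h1, h2⟩, h3⟩ := h'
      have hx2s : x.2 ∉ s := by simpa using h1
      have hxa : x.1 ∈ A := List.contains_iff_mem.mp h2
      have hxb : x.2 ∈ B := List.contains_iff_mem.mp h3
      rw [ih (s.add x.2)]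
      constructor
      · rintro ⟨hnd, hns, hmem⟩
        refine ⟨?_, ?_, ?_⟩
        · simp only [List.map_cons, List.nodup_cons]
          refine ⟨?_, hnd⟩
          intro hm
          obtain ⟨y, hy, hy2⟩ := List.mem_map.mp hm
          exact hns y hy (by rw [PySem.Set.mem_add]; right; exact hy2)
        · intro y hy
          rcases List.mem_cons.mp hy with rfl | hy'
          · exact hx2s
          · intro hm
            exact hns y hy' (by rw [PySem.Set.mem_add]; left; exact hm)
        · intro y hy
          rcases List.mem_cons.mp hy with rfl | hy'
          · exact ⟨hxa, hxb⟩
          · exact hmem y hy'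
      · rintro ⟨hnd, hns, hmem⟩
        simp only [List.map_cons, List.nodup_cons] at hnd
        refine ⟨hnd.2, ?_, ?_⟩
        · intro y hy hm
          rw [PySem.Set.mem_add] at hm
          rcases hm with hm | hm
          · exact hns y (by simp [hy]) hm
          · exact hnd.1 (List.mem_map.mpr ⟨y, hy, hm⟩)
        · intro y hy; exact hmem y (by simp [hy])

lemma a_iff (R : List (Int × Int)) (A B : List Int) :
    is_injective R A B = true ↔
      (R.map Prod.snd).Nodup ∧ (∀ x ∈ R, x.1 ∈ A ∧ x.2 ∈ B) := by
  rw [is_injective, isInjLoop_iff]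
  simp [PySem.Set.empty]

-- adjacent zip scan = IsChain (· ≠ ·)
lemma zip_adj_all_ne_iff (l : List Int) :
    ((l.zip (l.drop 1)).all (fun p => p.1 != p.2) = true) ↔ l.IsChain (· ≠ ·) := by
  induction l with
  | nil => simp
  | cons a t ih =>
    cases t with
    | nil => simp
    | cons b t' =>
      simp only [List.drop_succ_cons, List.drop_zero, List.zip_cons_cons, List.all_cons,
        Bool.and_eq_true, bne_iff_ne, List.isChain_cons_cons] at *
      exact and_congr Iff.rfl ih

lemma chain_lt_of_le_ne : ∀ (l : List Int), l.IsChain (· ≤ ·) → l.IsChain (· ≠ ·) → l.IsChain (· < ·)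
  | [], _, _ => List.isChain_nil
  | [a], _, _ => List.isChain_singleton a
  | a :: b :: t, hle, hne => by
    rw [List.isChain_cons_cons] at *
    exact ⟨lt_of_le_of_ne hle.1 hne.1, chain_lt_of_le_ne (b :: t) hle.2 hne.2⟩

-- on a ≤-sorted list, no adjacent equals ↔ Nodup
lemma sorted_adj_ne_iff_nodup (l : List Int) (hs : l.Pairwise (· ≤ ·)) :
    l.IsChain (· ≠ ·) ↔ l.Nodup := by
  constructor
  · intro hc
    have hlt : l.IsChain (· < ·) := chain_lt_of_le_ne l hs.isChain hc
    exact (List.isChain_iff_pairwise.mp hlt).imp ne_of_lt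
  · intro hnd
    exact hnd.isChain

lemma alt_iff (R : List (Int × Int)) (A B : List Int) :
    is_injective_alt R A B = true ↔
      (R.map Prod.snd).Nodup ∧ (∀ x ∈ R, x.1 ∈ A ∧ x.2 ∈ B) := by
  simp only [is_injective_alt]
  by_cases hb : R.any (fun x => !((PySem.Set.ofList A).contains x.1) || !((PySem.Set.ofList B).contains x.2)) = true
  · simp only [hb, if_true]
    constructor
    · intro h; exact absurd h (by simp)
    · rintro ⟨_, hmem⟩
      exfalso
      obtain ⟨x, hx, hbad⟩ := List.any_eq_true.mp hb
      simp only [Bool.or_eq_true, Bool.not_eq_true'] at hbad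
      rcases hbad with h | h
      · exact absurd (hmem x hx).1
          (by simpa [PySem.Set.contains_iff, PySem.Set.mem_ofList] using h)
      · exact absurd (hmem x hx).2
          (by simpa [PySem.Set.contains_iff, PySem.Set.mem_ofList] using h)
  · have hb' : R.any (fun x => !((PySem.Set.ofList A).contains x.1) || !((PySem.Set.ofList B).contains x.2)) = false :=
      Bool.eq_false_iff.mpr hb
    simp only [hb', Bool.false_eq_true, if_false]
    have hmem : ∀ x ∈ R, x.1 ∈ A ∧ x.2 ∈ B := by
      intro x hx
      have h0 := List.any_eq_false.mp hb' x hx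
      simp only [Bool.or_eq_true, not_or, Bool.not_eq_true, Bool.not_eq_false'] at h0
      constructor
      · simpa [PySem.Set.contains_iff, PySem.Set.mem_ofList] using h0.1
      · simpa [PySem.Set.contains_iff, PySem.Set.mem_ofList] using h0.2
    rw [zip_adj_all_ne_iff,
        sorted_adj_ne_iff_nodup _ (by simpa using PySem.List.sorted_pairwise (R.map (fun x => x.2)) (fun v => v))]
    have hperm := PySem.List.sorted_perm (R.map (fun x => x.2)) (fun v => v) false
    rw [hperm.nodup_iff]
    exact (and_iff_left hmem).symm.trans (by rfl)

-- ===== VERDICT (by name: the statement is the Claim_ definition above) =====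
theorem is_injective_spec : Claim_equal_is_injective := by
  intro R A B _
  unfold Spec_is_injective
  rw [Bool.eq_iff_iff, a_iff, alt_iff]
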